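-- pv_equiv track=rewrite | github.com/yuchigong957/Similar | check_npu_partition.py | dfs_with_target
-- ===== SOURCE A (Python) =====
-- MAX_DEPTH = 32
--
-- def dfs_with_target(graph, start_node, target_node):
--     all_paths = []
--
--     def dfs(current, path):
--         current_length = len(path) + 1
--         if current_length > MAX_DEPTH:
--             return
--         new_path = path + [current]
--
--         if current == target_node:
--             all_paths.append(new_path)
--             return
--
--         for neighbor in graph.get(current, []):
--             if neighbor not in new_path:
--                 dfs(neighbor, new_path)
--
--     dfs(start_node, [])
--     return all_paths
-- ===== SOURCE B (Python) =====
-- MAX_DEPTH = 32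
--
-- def dfs_with_target(graph, start_node, target_node):
--     results = []
--     stack = [(start_node, [])]
--     while stack:
--         current, path = stack.pop()
--         if len(path) + 1 > MAX_DEPTH:
--             continue
--         new_path = path + [current]
--         if current == target_node:
--             results.append(new_path)
--             continue
--         for neighbor in reversed(graph.get(current, [])):
--             if neighbor not in new_path:
--                 stack.append((neighbor, new_path))
--     return results
-- ===== Notes on version B (the rewrite author's own statement) =====
-- stated objective: alternative
-- what changed: Replaced the nested recursive dfs helper mutating an outer all_paths list with an iterative DFS over an explicit stack of (node, path) pairs, pushing neighbors in reversed order so the visit order is identical.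
import Mathlib
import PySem

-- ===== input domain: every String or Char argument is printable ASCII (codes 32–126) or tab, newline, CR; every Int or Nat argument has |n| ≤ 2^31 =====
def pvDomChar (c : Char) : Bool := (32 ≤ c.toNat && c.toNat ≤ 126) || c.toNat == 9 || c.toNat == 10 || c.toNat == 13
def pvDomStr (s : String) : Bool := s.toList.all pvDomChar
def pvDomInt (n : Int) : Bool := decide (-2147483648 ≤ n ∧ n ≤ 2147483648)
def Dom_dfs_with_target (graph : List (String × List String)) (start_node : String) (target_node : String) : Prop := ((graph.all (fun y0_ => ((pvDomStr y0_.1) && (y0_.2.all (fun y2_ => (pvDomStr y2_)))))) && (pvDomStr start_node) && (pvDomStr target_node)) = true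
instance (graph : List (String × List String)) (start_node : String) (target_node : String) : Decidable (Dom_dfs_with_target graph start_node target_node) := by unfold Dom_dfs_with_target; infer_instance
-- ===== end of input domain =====

-- B replaces A's nested recursive DFS by an explicit iterative stack of (node, path) pairs
-- (neighbors pushed in reversed order so the visit order is identical); same cost, 'alternative'.

-- shared helper: graph.get(current, []) — first-match lookup in the association list
def pvLookup (graph : List (String × List String)) (c : String) : List String :=
  match graph.find? (fun q => q.1 == c) with
  | some q => q.2
  | none => []

-- ===== PORT A =====
-- A's nested 'dfs' with the mutated outer list 'all_paths' threaded as accumulator 'acc';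
-- 'new_path' is written out as 'path ++ [current]'; the for-loop is the helper dfsALoop.
mutual
def dfsA (graph : List (String × List String)) (target : String)
    (current : String) (path : List String) (acc : List (List String)) : List (List String) :=
  if 32 < path.length + 1 then acc
  else if current == target then acc ++ [path ++ [current]]
  else dfsALoop graph target (path ++ [current]) (pvLookup graph current) acc
termination_by (34 - path.length, 0)
decreasing_by apply Prod.Lex.left; simp; omega

def dfsALoop (graph : List (String × List String)) (target : String)
    (np : List String) (l : List String) (acc : List (List String)) : List (List String) :=
  match l with
  | [] => acc
  | nb :: rest =>
    if np.contains nb then dfsALoop graph target np rest acc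
    else dfsALoop graph target np rest (dfsA graph target nb np acc)
termination_by (34 - np.length, l.length + 1)
decreasing_by
  · apply Prod.Lex.right; simp only [List.length_cons]; omega
  · apply Prod.Lex.right; omega
  · apply Prod.Lex.right; simp only [List.length_cons]; omega
end

def dfs_with_target (graph : List (String × List String)) (start_node : String) (target_node : String) : List (List String) :=
  dfsA graph target_node start_node [] []

-- ===== PORT B =====
-- termination measure helpers (not part of the computation): total neighbor mass and stack weight
def pvBB (graph : List (String × List String)) : Nat := (graph.map (fun q => q.2.length)).sum

def stackW (graph : List (String × List String)) (S : List (String × List String)) : Nat :=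
  (S.map (fun e => (pvBB graph + 1) ^ (33 - e.2.length))).sum

theorem pvLookup_le (graph : List (String × List String)) (c : String) :
    (pvLookup graph c).length ≤ pvBB graph := by
  induction graph with
  | nil => simp [pvLookup, pvBB]
  | cons q g ih =>
    simp only [pvLookup, List.find?, pvBB, List.map_cons, List.sum_cons] at *
    by_cases h : q.1 == c
    · simp [h]
    · simp only [h]; omega

theorem stackW_append (g : List (String × List String)) (S T : List (String × List String)) :
    stackW g (S ++ T) = stackW g S + stackW g T := by simp [stackW]

theorem sum_map_const_nat {a : Type} (l : List a) (n : Nat) :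
    (l.map (fun _ => n)).sum = l.length * n := by
  induction l with
  | nil => simp
  | cons x xs ih => simp [Nat.succ_mul, Nat.add_comm]

-- B: iterative DFS over an explicit stack (head = top); neighbors are pushed in reversed
-- order, which in head-representation is '(reversed-then-filtered).reverse ++ stack'.
def dfsB (graph : List (String × List String)) (target : String) :
    List (String × List String) → List (List String) → List (List String)
  | [], res => res
  | (c, p) :: S, res =>
    if 32 < p.length + 1 then dfsB graph target S res
    else if c == target then dfsB graph target S (res ++ [p ++ [c]])
    else dfsB graph target
      ((((pvLookup graph c).reverse.filter (fun nb => !((p ++ [c]).contains nb))).reverse.map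
          (fun nb => (nb, p ++ [c]))) ++ S) res
termination_by S _ => stackW graph S
decreasing_by
  · simp [stackW]
  · simp [stackW]
  · rw [stackW_append]
    simp only [stackW, List.map_map, List.map_cons, List.sum_cons]
    have hlen : (((pvLookup graph c).reverse.filter
        (fun nb => !((p ++ [c]).contains nb))).reverse.length) ≤ pvBB graph := by
      simp only [List.length_reverse]
      calc ((pvLookup graph c).reverse.filter _).length
          ≤ (pvLookup graph c).reverse.length := List.length_filter_le _ _
        _ = (pvLookup graph c).length := List.length_reverse
        _ ≤ pvBB graph := pvLookup_le graph c
    have hW : ((fun e => (pvBB graph + 1) ^ (33 - e.2.length)) ∘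
        (fun nb : String => (nb, p ++ [c])))
        = fun _ => (pvBB graph + 1) ^ (32 - p.length) := by
      funext nb
      have h32 : 33 - (p ++ [c]).length = 32 - p.length := by simp
      simp
    rw [hW, sum_map_const_nat]
    have hX : 0 < (pvBB graph + 1) ^ (32 - p.length) := pow_pos (by omega) _
    have h33 : 33 - p.length = (32 - p.length) + 1 := by omega
    have hlt : (((pvLookup graph c).reverse.filter
        (fun nb => !((p ++ [c]).contains nb))).reverse.length)
          * (pvBB graph + 1) ^ (32 - p.length)
        < (pvBB graph + 1) ^ (33 - p.length) := by
      rw [h33, pow_succ]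
      calc _ ≤ pvBB graph * (pvBB graph + 1) ^ (32 - p.length) :=
            Nat.mul_le_mul_right _ hlen
        _ < (pvBB graph + 1) * (pvBB graph + 1) ^ (32 - p.length) :=
            Nat.mul_lt_mul_of_pos_right (by omega) hX
        _ = (pvBB graph + 1) ^ (32 - p.length) * (pvBB graph + 1) := Nat.mul_comm _ _
    omega

def dfs_with_target_alt (graph : List (String × List String)) (start_node : String) (target_node : String) : List (List String) :=
  dfsB graph target_node [(start_node, [])] []

-- ===== PRECONDITION & SPEC =====
def Spec_dfs_with_target (graph : List (String × List String)) (start_node : String) (target_node : String) (out : List (List String)) : Prop := out = dfs_with_target_alt graph start_node target_node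
instance (graph : List (String × List String)) (start_node : String) (target_node : String) (out : List (List String)) : Decidable (Spec_dfs_with_target graph start_node target_node out) := by unfold Spec_dfs_with_target; infer_instance

-- ===== CLAIM (what is proved, stated in full; the proofs are below) =====
def Claim_equal_dfs_with_target : Prop := ∀ (graph : List (String × List String)) (start_node : String) (target_node : String), Dom_dfs_with_target graph start_node target_node → Spec_dfs_with_target graph start_node target_node (dfs_with_target graph start_node target_node)

-- ===== LEMMAS AND PROOFS =====

theorem rev_filter_rev {α : Type} (p : α → Bool) (l : List α) :
    (l.reverse.filter p).reverse = l.filter p := by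
  rw [← List.filter_reverse, List.reverse_reverse]

-- processing the top stack entry fully equals running A's dfs on it, then the rest
theorem dfsB_cons (graph : List (String × List String)) (target : String) :
    ∀ (d : Nat) (c : String) (p : List String) (S : List (String × List String))
      (res : List (List String)), 33 - p.length ≤ d →
      dfsB graph target ((c, p) :: S) res = dfsB graph target S (dfsA graph target c p res) := by
  intro d
  induction d with
  | zero =>
    intro c p S res h
    have hp : 32 < p.length + 1 := by omega
    rw [dfsB, dfsA]
    simp [hp]
  | succ d ih =>
    intro c p S res h
    by_cases hp : 32 < p.length + 1
    · rw [dfsB, dfsA]; simp [hp]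
    · by_cases ht : c == target
      · rw [dfsB, dfsA]; simp [hp, ht]
      · rw [dfsB, dfsA]
        simp only [hp, ht, Bool.false_eq_true, if_false]
        rw [rev_filter_rev]
        have hd : 33 - (p ++ [c]).length ≤ d := by simp; omega
        generalize pvLookup graph c = l
        induction l generalizing res with
        | nil => rw [dfsALoop]; simp
        | cons nb rest ihl =>
          rw [dfsALoop]
          by_cases hm : (p ++ [c]).contains nb
          · simp only [hm, if_true, List.filter_cons, Bool.not_true,
              Bool.false_eq_true, if_false]
            exact ihl res
          · simp only [hm, if_false, List.filter_cons, Bool.not_false, if_true,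
              List.map_cons, List.cons_append, Bool.false_eq_true]
            rw [ih nb (p ++ [c]) _ res hd]
            exact ihl (dfsA graph target nb (p ++ [c]) res)

-- ===== VERDICT (by name: the statement is the Claim_ definition above) =====
theorem dfs_with_target_spec : Claim_equal_dfs_with_target := by
  intro graph s t _
  unfold Spec_dfs_with_target dfs_with_target dfs_with_target_alt
  rw [dfsB_cons graph t 33 s [] [] [] (by simp)]
  rw [dfsB]
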